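-- pv_equiv track=rewrite | github.com/markjvillanueva3-cloud/PRISMV9 | archives/scripts-old/materials_unique_gen.py | detect_material_type
-- ===== SOURCE A (Python) =====
-- def detect_material_type(name, iso_group, file_path=""):
--     """Detect material type"""
--     name_lower = name.lower()
--     file_lower = (file_path or "").lower()
--
--     if any(x in name_lower for x in ["stainless", "304", "316", "410", "420", "17-4", "15-5", "inox"]):
--         return "stainless"
--     if "austenitic" in file_lower or "ferritic" in file_lower:
--         return "stainless"
--     if any(x in name_lower for x in ["inconel", "hastelloy", "waspaloy", "rene", "nimonic", "stellite"]):
--         return "superalloy"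
--     if any(x in name_lower for x in ["titanium", "ti-6al", "ti-", "grade 5", "cp ti"]):
--         return "titanium"
--     if any(x in name_lower for x in ["aluminum", "aluminium"]) or (iso_group == "N" and "-t" in name_lower):
--         return "aluminum"
--     if any(x in name_lower for x in ["cast iron", "gray iron", "grey iron", "ductile", "malleable", "class ", "cgi"]):
--         return "cast_iron"
--     if any(x in name_lower for x in ["copper", "ofhc"]) or "c1" in name_lower[:3]:
--         return "copper"
--     if "bronze" in name_lower:
--         return "bronze"
--     if "brass" in name_lower:
--         return "brass"
--     if any(x in name_lower for x in ["peek", "nylon", "pa6", "pa12", "pom", "abs", "pvc", "pei", "ultem", "polymer", "plastic", "delrin", "acetal"]):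
--         return "polymer"
--     if any(x in name_lower for x in ["ceramic", "alumina", "zirconia", "carbide", "nitride"]):
--         return "ceramic"
--     if any(x in name_lower for x in ["wood", "oak", "maple", "pine", "cedar", "walnut", "cherry", "birch", "ash", "mdf", "plywood"]):
--         return "wood"
--     if any(x in name_lower for x in ["cfrp", "gfrp", "composite", "carbon fiber", "kevlar", "aramid", "fiberglass"]):
--         return "composite"
--     if "graphite" in name_lower:
--         return "graphite"
--     if any(x in name_lower for x in ["rubber", "nbr", "epdm", "silicone", "neoprene", "viton", "elastomer"]):
--         return "elastomer"
--     if any(x in name_lower for x in ["honeycomb", "foam", "sandwich"]):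
--         return "foam"
--     if "magnesium" in name_lower or "az31" in name_lower or "az91" in name_lower:
--         return "magnesium"
--
--     iso_map = {"P": "steel", "M": "stainless", "K": "cast_iron", "N": "aluminum",
--                "S": "superalloy", "H": "hardened_steel", "X": "specialty"}
--     return iso_map.get(iso_group, "steel")
-- ===== SOURCE B (Python) =====
-- # Builds the result back-to-front: a flat (kind, pattern, label) table is folded in
-- # reverse priority order with an overwrite accumulator seeded from the ISO fallback,
-- # so the forward-highest-priority match wins without any early return (objective: alternative).
--
-- _ISO_MAP = {"P": "steel", "M": "stainless", "K": "cast_iron", "N": "aluminum",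
--             "S": "superalloy", "H": "hardened_steel", "X": "specialty"}
--
-- # Flat priority-ordered pattern table.  kind: "name" = substring of name;
-- # "file" = substring of file path; "iso_t" = iso N with the pattern in name;
-- # "prefix" = pattern inside the first 3 chars of name.
-- _PATTERNS = (
--     [("name", k, "stainless") for k in
--      ["stainless", "304", "316", "410", "420", "17-4", "15-5", "inox"]]
--     + [("file", "austenitic", "stainless"), ("file", "ferritic", "stainless")]
--     + [("name", k, "superalloy") for k in
--        ["inconel", "hastelloy", "waspaloy", "rene", "nimonic", "stellite"]]
--     + [("name", k, "titanium") for k in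
--        ["titanium", "ti-6al", "ti-", "grade 5", "cp ti"]]
--     + [("name", k, "aluminum") for k in ["aluminum", "aluminium"]]
--     + [("iso_t", "-t", "aluminum")]
--     + [("name", k, "cast_iron") for k in
--        ["cast iron", "gray iron", "grey iron", "ductile", "malleable", "class ", "cgi"]]
--     + [("name", k, "copper") for k in ["copper", "ofhc"]]
--     + [("prefix", "c1", "copper")]
--     + [("name", "bronze", "bronze"), ("name", "brass", "brass")]
--     + [("name", k, "polymer") for k in
--        ["peek", "nylon", "pa6", "pa12", "pom", "abs", "pvc", "pei", "ultem",
--         "polymer", "plastic", "delrin", "acetal"]]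
--     + [("name", k, "ceramic") for k in
--        ["ceramic", "alumina", "zirconia", "carbide", "nitride"]]
--     + [("name", k, "wood") for k in
--        ["wood", "oak", "maple", "pine", "cedar", "walnut", "cherry", "birch",
--         "ash", "mdf", "plywood"]]
--     + [("name", k, "composite") for k in
--        ["cfrp", "gfrp", "composite", "carbon fiber", "kevlar", "aramid", "fiberglass"]]
--     + [("name", "graphite", "graphite")]
--     + [("name", k, "elastomer") for k in
--        ["rubber", "nbr", "epdm", "silicone", "neoprene", "viton", "elastomer"]]
--     + [("name", k, "foam") for k in ["honeycomb", "foam", "sandwich"]]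
--     + [("name", k, "magnesium") for k in ["magnesium", "az31", "az91"]]
-- )
--
--
-- def detect_material_type(name, iso_group, file_path=""):
--     """Detect material type"""
--     name_lower = name.lower()
--     file_lower = (file_path or "").lower()
--     result = _ISO_MAP.get(iso_group, "steel")
--     for kind, pat, label in reversed(_PATTERNS):
--         if ((kind == "name" and pat in name_lower)
--                 or (kind == "file" and pat in file_lower)
--                 or (kind == "iso_t" and iso_group == "N" and pat in name_lower)
--                 or (kind == "prefix" and pat in name_lower[:3])):
--             result = label
--     return result
-- ===== Notes on version B (the rewrite author's own statement) =====
-- stated objective: alternative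
-- what changed: Replaced A's 18-branch early-return if-chain by a back-to-front fold: a flat (kind, pattern, label) table is iterated in reverse priority order with an overwrite accumulator seeded from the ISO fallback, so the forward-first match wins without any early return.
import Mathlib
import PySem

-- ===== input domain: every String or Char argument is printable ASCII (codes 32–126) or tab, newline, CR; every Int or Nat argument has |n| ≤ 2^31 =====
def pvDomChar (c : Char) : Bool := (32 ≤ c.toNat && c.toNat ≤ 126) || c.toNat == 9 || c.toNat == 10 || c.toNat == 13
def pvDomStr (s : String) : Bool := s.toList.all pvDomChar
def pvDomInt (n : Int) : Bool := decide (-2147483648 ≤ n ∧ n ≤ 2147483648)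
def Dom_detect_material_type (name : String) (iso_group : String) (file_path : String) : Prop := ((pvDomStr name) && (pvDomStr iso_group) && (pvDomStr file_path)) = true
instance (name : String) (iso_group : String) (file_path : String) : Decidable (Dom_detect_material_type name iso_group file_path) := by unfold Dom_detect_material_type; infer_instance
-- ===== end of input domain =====

-- B builds the result back-to-front: it folds a flat (kind, pattern, label) table in reverse
-- priority order with an overwrite accumulator seeded from the ISO fallback, instead of A's
-- early-return if-chain (objective: alternative, same asymptotic cost).

-- ===== PORT A =====
def detect_material_type (name : String) (iso_group : String) (file_path : String) : String :=
  let name_lower := PySem.Str.lower name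
  let file_lower := PySem.Str.lower (if file_path == "" then "" else file_path)
  if (["stainless", "304", "316", "410", "420", "17-4", "15-5", "inox"]).any (fun x => PySem.Str.isIn x name_lower) then "stainless"
  else if PySem.Str.isIn "austenitic" file_lower || PySem.Str.isIn "ferritic" file_lower then "stainless"
  else if (["inconel", "hastelloy", "waspaloy", "rene", "nimonic", "stellite"]).any (fun x => PySem.Str.isIn x name_lower) then "superalloy"
  else if (["titanium", "ti-6al", "ti-", "grade 5", "cp ti"]).any (fun x => PySem.Str.isIn x name_lower) then "titanium"
  else if (["aluminum", "aluminium"]).any (fun x => PySem.Str.isIn x name_lower) || (iso_group == "N" && PySem.Str.isIn "-t" name_lower) then "aluminum"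
  else if (["cast iron", "gray iron", "grey iron", "ductile", "malleable", "class ", "cgi"]).any (fun x => PySem.Str.isIn x name_lower) then "cast_iron"
  else if (["copper", "ofhc"]).any (fun x => PySem.Str.isIn x name_lower) || PySem.Str.isIn "c1" (String.ofList (PySem.List.slice name_lower.toList none (some 3))) then "copper"
  else if PySem.Str.isIn "bronze" name_lower then "bronze"
  else if PySem.Str.isIn "brass" name_lower then "brass"
  else if (["peek", "nylon", "pa6", "pa12", "pom", "abs", "pvc", "pei", "ultem", "polymer", "plastic", "delrin", "acetal"]).any (fun x => PySem.Str.isIn x name_lower) then "polymer"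
  else if (["ceramic", "alumina", "zirconia", "carbide", "nitride"]).any (fun x => PySem.Str.isIn x name_lower) then "ceramic"
  else if (["wood", "oak", "maple", "pine", "cedar", "walnut", "cherry", "birch", "ash", "mdf", "plywood"]).any (fun x => PySem.Str.isIn x name_lower) then "wood"
  else if (["cfrp", "gfrp", "composite", "carbon fiber", "kevlar", "aramid", "fiberglass"]).any (fun x => PySem.Str.isIn x name_lower) then "composite"
  else if PySem.Str.isIn "graphite" name_lower then "graphite"
  else if (["rubber", "nbr", "epdm", "silicone", "neoprene", "viton", "elastomer"]).any (fun x => PySem.Str.isIn x name_lower) then "elastomer"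
  else if (["honeycomb", "foam", "sandwich"]).any (fun x => PySem.Str.isIn x name_lower) then "foam"
  else if PySem.Str.isIn "magnesium" name_lower || PySem.Str.isIn "az31" name_lower || PySem.Str.isIn "az91" name_lower then "magnesium"
  else
    (PySem.Dict.ofList [("P", "steel"), ("M", "stainless"), ("K", "cast_iron"), ("N", "aluminum"),
                        ("S", "superalloy"), ("H", "hardened_steel"), ("X", "specialty")]).getD iso_group "steel"

-- ===== PORT B =====
def pvPatternsB : List (String × String × String) :=
  [ ("name", "stainless", "stainless"),
    ("name", "304", "stainless"),
    ("name", "316", "stainless"),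
    ("name", "410", "stainless"),
    ("name", "420", "stainless"),
    ("name", "17-4", "stainless"),
    ("name", "15-5", "stainless"),
    ("name", "inox", "stainless"),
    ("file", "austenitic", "stainless"),
    ("file", "ferritic", "stainless"),
    ("name", "inconel", "superalloy"),
    ("name", "hastelloy", "superalloy"),
    ("name", "waspaloy", "superalloy"),
    ("name", "rene", "superalloy"),
    ("name", "nimonic", "superalloy"),
    ("name", "stellite", "superalloy"),
    ("name", "titanium", "titanium"),
    ("name", "ti-6al", "titanium"),
    ("name", "ti-", "titanium"),
    ("name", "grade 5", "titanium"),
    ("name", "cp ti", "titanium"),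
    ("name", "aluminum", "aluminum"),
    ("name", "aluminium", "aluminum"),
    ("iso_t", "-t", "aluminum"),
    ("name", "cast iron", "cast_iron"),
    ("name", "gray iron", "cast_iron"),
    ("name", "grey iron", "cast_iron"),
    ("name", "ductile", "cast_iron"),
    ("name", "malleable", "cast_iron"),
    ("name", "class ", "cast_iron"),
    ("name", "cgi", "cast_iron"),
    ("name", "copper", "copper"),
    ("name", "ofhc", "copper"),
    ("prefix", "c1", "copper"),
    ("name", "bronze", "bronze"),
    ("name", "brass", "brass"),
    ("name", "peek", "polymer"),
    ("name", "nylon", "polymer"),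
    ("name", "pa6", "polymer"),
    ("name", "pa12", "polymer"),
    ("name", "pom", "polymer"),
    ("name", "abs", "polymer"),
    ("name", "pvc", "polymer"),
    ("name", "pei", "polymer"),
    ("name", "ultem", "polymer"),
    ("name", "polymer", "polymer"),
    ("name", "plastic", "polymer"),
    ("name", "delrin", "polymer"),
    ("name", "acetal", "polymer"),
    ("name", "ceramic", "ceramic"),
    ("name", "alumina", "ceramic"),
    ("name", "zirconia", "ceramic"),
    ("name", "carbide", "ceramic"),
    ("name", "nitride", "ceramic"),
    ("name", "wood", "wood"),
    ("name", "oak", "wood"),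
    ("name", "maple", "wood"),
    ("name", "pine", "wood"),
    ("name", "cedar", "wood"),
    ("name", "walnut", "wood"),
    ("name", "cherry", "wood"),
    ("name", "birch", "wood"),
    ("name", "ash", "wood"),
    ("name", "mdf", "wood"),
    ("name", "plywood", "wood"),
    ("name", "cfrp", "composite"),
    ("name", "gfrp", "composite"),
    ("name", "composite", "composite"),
    ("name", "carbon fiber", "composite"),
    ("name", "kevlar", "composite"),
    ("name", "aramid", "composite"),
    ("name", "fiberglass", "composite"),
    ("name", "graphite", "graphite"),
    ("name", "rubber", "elastomer"),
    ("name", "nbr", "elastomer"),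
    ("name", "epdm", "elastomer"),
    ("name", "silicone", "elastomer"),
    ("name", "neoprene", "elastomer"),
    ("name", "viton", "elastomer"),
    ("name", "elastomer", "elastomer"),
    ("name", "honeycomb", "foam"),
    ("name", "foam", "foam"),
    ("name", "sandwich", "foam"),
    ("name", "magnesium", "magnesium"),
    ("name", "az31", "magnesium"),
    ("name", "az91", "magnesium") ]

def pvIsoMapB : PySem.Dict String String :=
  PySem.Dict.ofList [("P", "steel"), ("M", "stainless"), ("K", "cast_iron"), ("N", "aluminum"),
                     ("S", "superalloy"), ("H", "hardened_steel"), ("X", "specialty")]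

def detect_material_type_alt (name : String) (iso_group : String) (file_path : String) : String :=
  let name_lower := PySem.Str.lower name
  let file_lower := PySem.Str.lower (if file_path == "" then "" else file_path)
  (pvPatternsB.reverse).foldl
    (fun result e =>
      if (e.1 == "name" && PySem.Str.isIn e.2.1 name_lower)
         || (e.1 == "file" && PySem.Str.isIn e.2.1 file_lower)
         || (e.1 == "iso_t" && (iso_group == "N" && PySem.Str.isIn e.2.1 name_lower))
         || (e.1 == "prefix" && PySem.Str.isIn e.2.1 (String.ofList (PySem.List.slice name_lower.toList none (some 3))))
      then e.2.2 else result)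
    (pvIsoMapB.getD iso_group "steel")

-- ===== PRECONDITION & SPEC =====
def Spec_detect_material_type (name : String) (iso_group : String) (file_path : String) (out : String) : Prop := out = detect_material_type_alt name iso_group file_path
instance (name : String) (iso_group : String) (file_path : String) (out : String) : Decidable (Spec_detect_material_type name iso_group file_path out) := by unfold Spec_detect_material_type; infer_instance

-- ===== CLAIM =====
def Claim_equal_detect_material_type : Prop := ∀ (name : String) (iso_group : String) (file_path : String), Dom_detect_material_type name iso_group file_path → Spec_detect_material_type name iso_group file_path (detect_material_type name iso_group file_path)

-- ===== LEMMAS AND PROOFS =====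

-- ===== VERDICT =====
set_option maxHeartbeats 4000000 in
theorem detect_material_type_spec : Claim_equal_detect_material_type := by
  intro name iso_group file_path _
  unfold Spec_detect_material_type detect_material_type detect_material_type_alt pvPatternsB pvIsoMapB
  simp only [List.reverse, List.reverseAux, List.foldl, List.any_cons, List.any_nil,
    String.reduceBEq, Bool.true_and, Bool.false_and, Bool.or_false, Bool.false_or,
    Bool.or_assoc]
  cases h0 : (PySem.Str.isIn "stainless" (PySem.Str.lower name))
  case true => rfl
  cases h1 : (PySem.Str.isIn "304" (PySem.Str.lower name))
  case true => rfl
  cases h2 : (PySem.Str.isIn "316" (PySem.Str.lower name))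
  case true => rfl
  cases h3 : (PySem.Str.isIn "410" (PySem.Str.lower name))
  case true => rfl
  cases h4 : (PySem.Str.isIn "420" (PySem.Str.lower name))
  case true => rfl
  cases h5 : (PySem.Str.isIn "17-4" (PySem.Str.lower name))
  case true => rfl
  cases h6 : (PySem.Str.isIn "15-5" (PySem.Str.lower name))
  case true => rfl
  cases h7 : (PySem.Str.isIn "inox" (PySem.Str.lower name))
  case true => rfl
  cases h8 : (PySem.Str.isIn "austenitic" (PySem.Str.lower (if file_path == "" then "" else file_path)))
  case true => rfl
  cases h9 : (PySem.Str.isIn "ferritic" (PySem.Str.lower (if file_path == "" then "" else file_path)))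
  case true => rfl
  cases h10 : (PySem.Str.isIn "inconel" (PySem.Str.lower name))
  case true => rfl
  cases h11 : (PySem.Str.isIn "hastelloy" (PySem.Str.lower name))
  case true => rfl
  cases h12 : (PySem.Str.isIn "waspaloy" (PySem.Str.lower name))
  case true => rfl
  cases h13 : (PySem.Str.isIn "rene" (PySem.Str.lower name))
  case true => rfl
  cases h14 : (PySem.Str.isIn "nimonic" (PySem.Str.lower name))
  case true => rfl
  cases h15 : (PySem.Str.isIn "stellite" (PySem.Str.lower name))
  case true => rfl
  cases h16 : (PySem.Str.isIn "titanium" (PySem.Str.lower name))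
  case true => rfl
  cases h17 : (PySem.Str.isIn "ti-6al" (PySem.Str.lower name))
  case true => rfl
  cases h18 : (PySem.Str.isIn "ti-" (PySem.Str.lower name))
  case true => rfl
  cases h19 : (PySem.Str.isIn "grade 5" (PySem.Str.lower name))
  case true => rfl
  cases h20 : (PySem.Str.isIn "cp ti" (PySem.Str.lower name))
  case true => rfl
  cases h21 : (PySem.Str.isIn "aluminum" (PySem.Str.lower name))
  case true => rfl
  cases h22 : (PySem.Str.isIn "aluminium" (PySem.Str.lower name))
  case true => rfl
  cases h23 : (iso_group == "N" && PySem.Str.isIn "-t" (PySem.Str.lower name))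
  case true => rfl
  cases h24 : (PySem.Str.isIn "cast iron" (PySem.Str.lower name))
  case true => rfl
  cases h25 : (PySem.Str.isIn "gray iron" (PySem.Str.lower name))
  case true => rfl
  cases h26 : (PySem.Str.isIn "grey iron" (PySem.Str.lower name))
  case true => rfl
  cases h27 : (PySem.Str.isIn "ductile" (PySem.Str.lower name))
  case true => rfl
  cases h28 : (PySem.Str.isIn "malleable" (PySem.Str.lower name))
  case true => rfl
  cases h29 : (PySem.Str.isIn "class " (PySem.Str.lower name))
  case true => rfl
  cases h30 : (PySem.Str.isIn "cgi" (PySem.Str.lower name))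
  case true => rfl
  cases h31 : (PySem.Str.isIn "copper" (PySem.Str.lower name))
  case true => rfl
  cases h32 : (PySem.Str.isIn "ofhc" (PySem.Str.lower name))
  case true => rfl
  cases h33 : (PySem.Str.isIn "c1" (String.ofList (PySem.List.slice (PySem.Str.lower name).toList none (some 3))))
  case true => rfl
  cases h34 : (PySem.Str.isIn "bronze" (PySem.Str.lower name))
  case true => rfl
  cases h35 : (PySem.Str.isIn "brass" (PySem.Str.lower name))
  case true => rfl
  cases h36 : (PySem.Str.isIn "peek" (PySem.Str.lower name))
  case true => rfl
  cases h37 : (PySem.Str.isIn "nylon" (PySem.Str.lower name))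
  case true => rfl
  cases h38 : (PySem.Str.isIn "pa6" (PySem.Str.lower name))
  case true => rfl
  cases h39 : (PySem.Str.isIn "pa12" (PySem.Str.lower name))
  case true => rfl
  cases h40 : (PySem.Str.isIn "pom" (PySem.Str.lower name))
  case true => rfl
  cases h41 : (PySem.Str.isIn "abs" (PySem.Str.lower name))
  case true => rfl
  cases h42 : (PySem.Str.isIn "pvc" (PySem.Str.lower name))
  case true => rfl
  cases h43 : (PySem.Str.isIn "pei" (PySem.Str.lower name))
  case true => rfl
  cases h44 : (PySem.Str.isIn "ultem" (PySem.Str.lower name))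
  case true => rfl
  cases h45 : (PySem.Str.isIn "polymer" (PySem.Str.lower name))
  case true => rfl
  cases h46 : (PySem.Str.isIn "plastic" (PySem.Str.lower name))
  case true => rfl
  cases h47 : (PySem.Str.isIn "delrin" (PySem.Str.lower name))
  case true => rfl
  cases h48 : (PySem.Str.isIn "acetal" (PySem.Str.lower name))
  case true => rfl
  cases h49 : (PySem.Str.isIn "ceramic" (PySem.Str.lower name))
  case true => rfl
  cases h50 : (PySem.Str.isIn "alumina" (PySem.Str.lower name))
  case true => rfl
  cases h51 : (PySem.Str.isIn "zirconia" (PySem.Str.lower name))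
  case true => rfl
  cases h52 : (PySem.Str.isIn "carbide" (PySem.Str.lower name))
  case true => rfl
  cases h53 : (PySem.Str.isIn "nitride" (PySem.Str.lower name))
  case true => rfl
  cases h54 : (PySem.Str.isIn "wood" (PySem.Str.lower name))
  case true => rfl
  cases h55 : (PySem.Str.isIn "oak" (PySem.Str.lower name))
  case true => rfl
  cases h56 : (PySem.Str.isIn "maple" (PySem.Str.lower name))
  case true => rfl
  cases h57 : (PySem.Str.isIn "pine" (PySem.Str.lower name))
  case true => rfl
  cases h58 : (PySem.Str.isIn "cedar" (PySem.Str.lower name))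
  case true => rfl
  cases h59 : (PySem.Str.isIn "walnut" (PySem.Str.lower name))
  case true => rfl
  cases h60 : (PySem.Str.isIn "cherry" (PySem.Str.lower name))
  case true => rfl
  cases h61 : (PySem.Str.isIn "birch" (PySem.Str.lower name))
  case true => rfl
  cases h62 : (PySem.Str.isIn "ash" (PySem.Str.lower name))
  case true => rfl
  cases h63 : (PySem.Str.isIn "mdf" (PySem.Str.lower name))
  case true => rfl
  cases h64 : (PySem.Str.isIn "plywood" (PySem.Str.lower name))
  case true => rfl
  cases h65 : (PySem.Str.isIn "cfrp" (PySem.Str.lower name))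
  case true => rfl
  cases h66 : (PySem.Str.isIn "gfrp" (PySem.Str.lower name))
  case true => rfl
  cases h67 : (PySem.Str.isIn "composite" (PySem.Str.lower name))
  case true => rfl
  cases h68 : (PySem.Str.isIn "carbon fiber" (PySem.Str.lower name))
  case true => rfl
  cases h69 : (PySem.Str.isIn "kevlar" (PySem.Str.lower name))
  case true => rfl
  cases h70 : (PySem.Str.isIn "aramid" (PySem.Str.lower name))
  case true => rfl
  cases h71 : (PySem.Str.isIn "fiberglass" (PySem.Str.lower name))
  case true => rfl
  cases h72 : (PySem.Str.isIn "graphite" (PySem.Str.lower name))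
  case true => rfl
  cases h73 : (PySem.Str.isIn "rubber" (PySem.Str.lower name))
  case true => rfl
  cases h74 : (PySem.Str.isIn "nbr" (PySem.Str.lower name))
  case true => rfl
  cases h75 : (PySem.Str.isIn "epdm" (PySem.Str.lower name))
  case true => rfl
  cases h76 : (PySem.Str.isIn "silicone" (PySem.Str.lower name))
  case true => rfl
  cases h77 : (PySem.Str.isIn "neoprene" (PySem.Str.lower name))
  case true => rfl
  cases h78 : (PySem.Str.isIn "viton" (PySem.Str.lower name))
  case true => rfl
  cases h79 : (PySem.Str.isIn "elastomer" (PySem.Str.lower name))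
  case true => rfl
  cases h80 : (PySem.Str.isIn "honeycomb" (PySem.Str.lower name))
  case true => rfl
  cases h81 : (PySem.Str.isIn "foam" (PySem.Str.lower name))
  case true => rfl
  cases h82 : (PySem.Str.isIn "sandwich" (PySem.Str.lower name))
  case true => rfl
  cases h83 : (PySem.Str.isIn "magnesium" (PySem.Str.lower name))
  case true => rfl
  cases h84 : (PySem.Str.isIn "az31" (PySem.Str.lower name))
  case true => rfl
  cases h85 : (PySem.Str.isIn "az91" (PySem.Str.lower name))
  case true => rfl
  rfl
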